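-- pv_equiv track=rewrite | github.com/vandalord/tinierfish | agents/agent_2_issue_extraction.py | _select_region
-- ===== SOURCE A (Python) =====
-- REGION_COORDINATES: dict[str, tuple[float, float]] = {
--     "Singapore": (1.3521, 103.8198),
--     "Malaysia": (4.2105, 101.9758),
--     "Indonesia": (-0.7893, 113.9213),
--     "Thailand": (15.87, 100.9925),
--     "Vietnam": (14.0583, 108.2772),
--     "Australia": (-25.2744, 133.7751),
--     "India": (20.5937, 78.9629),
--     "China": (35.8617, 104.1954),
-- }
--
-- def _select_region(source_region: str, affected_regions: list[str]) -> str: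
--     if source_region in REGION_COORDINATES:
--         return source_region
--
--     for region in affected_regions:
--         if region in REGION_COORDINATES and region != "Singapore":
--             return region
--
--     for region in affected_regions:
--         if region in REGION_COORDINATES:
--             return region
--
--     return "Singapore"
-- ===== SOURCE B (Python) =====
-- REGION_COORDINATES: dict[str, tuple[float, float]] = {
--     "Singapore": (1.3521, 103.8198),
--     "Malaysia": (4.2105, 101.9758),
--     "Indonesia": (-0.7893, 113.9213),
--     "Thailand": (15.87, 100.9925),
--     "Vietnam": (14.0583, 108.2772),
--     "Australia": (-25.2744, 133.7751),
--     "India": (20.5937, 78.9629),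
--     "China": (35.8617, 104.1954),
-- }
--
-- def _select_region(source_region: str, affected_regions: list[str]) -> str:
--     if source_region in REGION_COORDINATES:
--         return source_region
--     # Rank every valid affected region by an explicit priority key
--     # (1 for "Singapore", 0 otherwise; position breaks ties) and take the
--     # minimum — no early-return scans.
--     candidates = [
--         ((1 if r == "Singapore" else 0, i), r)
--         for i, r in enumerate(affected_regions)
--         if r in REGION_COORDINATES
--     ]
--     if not candidates:
--         return "Singapore"
--     return min(candidates, key=lambda c: c[0])[1]
-- ===== Notes on version B (the rewrite author's own statement) =====
-- stated objective: alternative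
-- what changed: Replaced A's two priority-ordered early-return scans by building a ranked candidate list ((is_singapore, index) keys) and selecting the minimum-key candidate, with an unconditional default when no candidate exists.
import Mathlib
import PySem

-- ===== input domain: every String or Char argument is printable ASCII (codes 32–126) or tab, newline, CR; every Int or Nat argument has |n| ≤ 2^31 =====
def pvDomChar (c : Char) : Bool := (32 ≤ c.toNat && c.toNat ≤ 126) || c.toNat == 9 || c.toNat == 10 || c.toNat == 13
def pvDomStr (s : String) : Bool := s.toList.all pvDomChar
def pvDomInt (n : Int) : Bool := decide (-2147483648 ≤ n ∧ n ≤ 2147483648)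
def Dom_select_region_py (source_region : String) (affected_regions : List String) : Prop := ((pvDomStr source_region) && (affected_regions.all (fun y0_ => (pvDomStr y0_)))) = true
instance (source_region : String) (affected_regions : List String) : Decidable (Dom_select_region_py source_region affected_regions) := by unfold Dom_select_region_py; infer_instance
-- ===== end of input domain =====

-- B replaces A's two priority-ordered early-return scans by ranking the valid
-- affected regions with explicit (is_singapore, index) keys and taking the
-- minimum-key candidate (objective: alternative decomposition, same cost).

-- ===== PORT A =====
-- Only the KEYS of REGION_COORDINATES affect the function (membership tests);
-- the float values are never used, so the dict is ported as its key list.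
def regionKeys : List String :=
  ["Singapore", "Malaysia", "Indonesia", "Thailand", "Vietnam", "Australia", "India", "China"]

-- first loop of A: first region that is a key and != "Singapore"
def pvLoopA1 : List String → Option String
  | [] => none
  | r :: rest => if regionKeys.contains r && r != "Singapore" then some r else pvLoopA1 rest

-- second loop of A: first region that is a key
def pvLoopA2 : List String → Option String
  | [] => none
  | r :: rest => if regionKeys.contains r then some r else pvLoopA2 rest

def select_region_py (source_region : String) (affected_regions : List String) : String :=
  if regionKeys.contains source_region then source_region
  else
    match pvLoopA1 affected_regions with
    | some r => r
    | none =>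
      match pvLoopA2 affected_regions with
      | some r => r
      | none => "Singapore"

-- ===== PORT B =====
-- the list comprehension of Source B: ((1 if r == "Singapore" else 0, i), r) for valid r
def pvCandidates (regs : List String) : List ((Nat × Int) × String) :=
  (PySem.List.enumerate regs 0).filterMap (fun p =>
    if regionKeys.contains p.2 then
      some (((if p.2 == "Singapore" then 1 else 0), p.1), p.2)
    else none)

-- Python's min(candidates, key=…) keeps the FIRST minimum; the keys (flag, index)
-- are compared lexicographically — exact, since min keeps the accumulator on ties.
def pvMinBy : ((Nat × Int) × String) → List ((Nat × Int) × String) → ((Nat × Int) × String)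
  | b, [] => b
  | b, c :: rest =>
      pvMinBy (if c.1.1 < b.1.1 ∨ (c.1.1 = b.1.1 ∧ c.1.2 < b.1.2) then c else b) rest

def select_region_py_alt (source_region : String) (affected_regions : List String) : String :=
  if regionKeys.contains source_region then source_region
  else
    match pvCandidates affected_regions with
    | [] => "Singapore"
    | c :: cs => (pvMinBy c cs).2

-- ===== PRECONDITION & SPEC =====
def Spec_select_region_py (source_region : String) (affected_regions : List String) (out : String) : Prop := out = select_region_py_alt source_region affected_regions
instance (source_region : String) (affected_regions : List String) (out : String) : Decidable (Spec_select_region_py source_region affected_regions out) := by unfold Spec_select_region_py; infer_instance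

-- ===== CLAIM (what is proved, stated in full; the proofs are below) =====
def Claim_equal_select_region_py : Prop := ∀ (source_region : String) (affected_regions : List String), Dom_select_region_py source_region affected_regions → Spec_select_region_py source_region affected_regions (select_region_py source_region affected_regions)

-- ===== LEMMAS AND PROOFS =====

-- A's two loops collapse to one find?-with-default
theorem find?_eq_pvLoopA1 (regs : List String) :
    regs.find? (fun r => decide (r ∈ regionKeys) && r != "Singapore") = pvLoopA1 regs := by
  induction regs with
  | nil => rfl
  | cons r rest ih =>
    simp only [List.find?, pvLoopA1, List.contains_eq_mem]
    cases h : (decide (r ∈ regionKeys) && r != "Singapore") <;> simp [ih]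

theorem loopA2_singapore (regs : List String) (h : pvLoopA1 regs = none) :
    (match pvLoopA2 regs with | some r => r | none => "Singapore") = "Singapore" := by
  induction regs with
  | nil => rfl
  | cons r rest ih =>
    simp only [pvLoopA1] at h
    by_cases hm : r ∈ regionKeys
    · by_cases hs : r = "Singapore"
      · subst hs; simp [pvLoopA2, List.contains_eq_mem, hm]
      · exfalso; simp [List.contains_eq_mem, hm, hs] at h
    · have h' : pvLoopA1 rest = none := by simpa [List.contains_eq_mem, hm] using h
      simp [pvLoopA2, List.contains_eq_mem, hm, ih h']

-- the min fold returns a member of its input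
theorem mem_pvMinBy (cs : List ((Nat × Int) × String)) (b : (Nat × Int) × String) :
    pvMinBy b cs ∈ b :: cs := by
  induction cs generalizing b with
  | nil => simp [pvMinBy]
  | cons c rest ih =>
    have := ih (if c.1.1 < b.1.1 ∨ (c.1.1 = b.1.1 ∧ c.1.2 < b.1.2) then c else b)
    simp only [pvMinBy]
    rcases List.mem_cons.mp this with h | h
    · rw [h]; split_ifs <;> simp
    · simp [h]

-- with strictly increasing indices and flags ≤ 1, the min is the first flag-0 element
theorem pvMinBy_first_zero (cs : List ((Nat × Int) × String)) (b : (Nat × Int) × String)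
    (hpw : (b :: cs).Pairwise (fun p q => p.1.2 < q.1.2))
    (hfl : ∀ p ∈ b :: cs, p.1.1 ≤ 1)
    (c0 : (Nat × Int) × String)
    (hf : (b :: cs).find? (fun p => p.1.1 == 0) = some c0) :
    pvMinBy b cs = c0 := by
  induction cs generalizing b with
  | nil =>
    by_cases hb : (b.1.1 == 0)
    · rw [List.find?_cons_of_pos (p := fun p : (Nat × Int) × String => p.1.1 == 0) hb] at hf
      simpa [pvMinBy] using (Option.some_inj.mp hf)
    · rw [List.find?_cons_of_neg (p := fun p : (Nat × Int) × String => p.1.1 == 0) hb] at hf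
      simp at hf
  | cons c rest ih =>
    have hidx : b.1.2 < c.1.2 := (List.pairwise_cons.mp hpw).1 c (by simp)
    by_cases hb : b.1.1 = 0
    · -- b is the first flag-0 element; b survives against c
      have hc0 : c0 = b := by
        rw [List.find?_cons_of_pos (p := fun p : (Nat × Int) × String => p.1.1 == 0) (by simpa using hb)] at hf
        exact (Option.some_inj.mp hf).symm
      have hkeep : (if c.1.1 < b.1.1 ∨ (c.1.1 = b.1.1 ∧ c.1.2 < b.1.2) then c else b) = b := by
        have : ¬ (c.1.1 < b.1.1 ∨ (c.1.1 = b.1.1 ∧ c.1.2 < b.1.2)) := by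
          rintro (h | ⟨_, h⟩) <;> omega
        simp [this]
      simp only [pvMinBy, hkeep]
      apply ih b
      · have h1 := List.pairwise_cons.mp hpw
        exact List.pairwise_cons.mpr
          ⟨fun q hq => h1.1 q (by simp [hq]), (List.pairwise_cons.mp h1.2).2⟩
      · intro p hp
        rcases List.mem_cons.mp hp with h | h <;> exact hfl p (by simp [h])
      · subst hc0
        exact List.find?_cons_of_pos (p := fun p : (Nat × Int) × String => p.1.1 == 0) (by simpa using hb)
    · -- b has flag 1
      have hb1 : b.1.1 = 1 := by have := hfl b (by simp); omega
      have hf' : (c :: rest).find? (fun p => p.1.1 == 0) = some c0 := by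
        rwa [List.find?_cons_of_neg (p := fun p : (Nat × Int) × String => p.1.1 == 0) (by simpa using hb)] at hf
      by_cases hc : c.1.1 = 0
      · -- c replaces b and is itself the first flag-0 element
        have hrepl : (if c.1.1 < b.1.1 ∨ (c.1.1 = b.1.1 ∧ c.1.2 < b.1.2) then c else b) = c := by
          simp [hc, hb1]
        simp only [pvMinBy, hrepl]
        apply ih c
        · exact (List.pairwise_cons.mp hpw).2
        · intro p hp; exact hfl p (by simp at hp; rcases hp with h | h <;> simp [h])
        · exact hf'
      · -- both flags are 1, b (earlier index) survives
        have hc1 : c.1.1 = 1 := by have := hfl c (by simp); omega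
        have hkeep : (if c.1.1 < b.1.1 ∨ (c.1.1 = b.1.1 ∧ c.1.2 < b.1.2) then c else b) = b := by
          have : ¬ (c.1.1 < b.1.1 ∨ (c.1.1 = b.1.1 ∧ c.1.2 < b.1.2)) := by
            rintro (h | ⟨_, h⟩) <;> omega
          simp [this]
        simp only [pvMinBy, hkeep]
        apply ih b
        · have h1 := List.pairwise_cons.mp hpw
          have h2 := List.pairwise_cons.mp h1.2
          exact List.pairwise_cons.mpr ⟨fun q hq => h1.1 q (by simp [hq]), h2.2⟩
        · intro p hp
          rcases List.mem_cons.mp hp with h | h <;> exact hfl p (by simp [h])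
        · rw [List.find?_cons_of_neg (p := fun p : (Nat × Int) × String => p.1.1 == 0) (by simpa using hb)]
          rwa [List.find?_cons_of_neg (p := fun p : (Nat × Int) × String => p.1.1 == 0) (by simpa using hc)] at hf'

-- flags of candidates are ≤ 1 and flag ≠ 0 means the string is "Singapore"
theorem candidates_flag (regs : List String) (p : (Nat × Int) × String)
    (hp : p ∈ pvCandidates regs) : p.1.1 ≤ 1 ∧ (p.1.1 ≠ 0 → p.2 = "Singapore") := by
  rcases List.mem_filterMap.mp hp with ⟨q, _, hq⟩
  by_cases hm : regionKeys.contains q.2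
  · rw [if_pos hm, Option.some_inj] at hq
    by_cases hs : q.2 == "Singapore"
    · subst hq; simp [hs]; exact (beq_iff_eq.mp hs)
    · subst hq; simp [hs]
  · rw [if_neg hm] at hq; exact absurd hq (by simp)

-- indices in the candidate list are strictly increasing
theorem candidates_pairwise (regs : List String) :
    (pvCandidates regs).Pairwise (fun p q => p.1.2 < q.1.2) := by
  apply List.Pairwise.filterMap _ _ (PySem.List.pairwise_lt_enumerate regs 0)
  intro a a' h b hb b' hb'
  by_cases hma : regionKeys.contains a.2
  · rw [if_pos hma, Option.some_inj] at hb
    by_cases hma' : regionKeys.contains a'.2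
    · rw [if_pos hma', Option.some_inj] at hb'
      subst hb; subst hb'; simpa using h
    · rw [if_neg hma'] at hb'; exact absurd hb'.symm (by simp)
  · rw [if_neg hma] at hb; exact absurd hb.symm (by simp)

-- the first flag-0 candidate is exactly A's first valid non-Singapore region
theorem candidates_find (regs : List String) (s : Int) :
    (((PySem.List.enumerate regs s).filterMap (fun p =>
        if regionKeys.contains p.2 then
          some (((if p.2 == "Singapore" then 1 else 0), p.1), p.2)
        else none)).find? (fun p => p.1.1 == 0)).map (·.2)
      = regs.find? (fun r => decide (r ∈ regionKeys) && r != "Singapore") := by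
  induction regs generalizing s with
  | nil => simp [PySem.List.enumerate_nil]
  | cons r rest ih =>
    rw [PySem.List.enumerate_cons]
    by_cases hm : regionKeys.contains r
    · by_cases hs : r = "Singapore"
      · subst hs
        have hmem : ("Singapore" : String) ∈ regionKeys := by decide
        simp only [List.filterMap_cons, hm, if_true]
        have hsg : (("Singapore" : String) == "Singapore") = true := by decide
        simp only [hsg, if_true, List.find?]
        simpa [hmem] using ih (s + 1)
      · have hsb : (r == "Singapore") = false := by simpa using hs
        have hmem : r ∈ regionKeys := by simpa [List.contains_iff_mem] using hm
        simp only [List.filterMap_cons, hm, if_true, hsb, List.find?]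
        simp [hmem, bne, hsb]
    · have hmem : r ∉ regionKeys := by simpa [List.contains_iff_mem] using hm
      simp only [List.filterMap_cons, hm]
      have hpred : (decide (r ∈ regionKeys) && r != "Singapore") = false := by simp [hmem]
      simp only [List.find?, hpred]
      exact ih (s + 1)

-- B's min-selection equals the single find?-with-default form
theorem alt_eq_find (regs : List String) :
    (match pvCandidates regs with
     | [] => "Singapore"
     | c :: cs => (pvMinBy c cs).2)
      = (regs.find? (fun r => decide (r ∈ regionKeys) && r != "Singapore")).getD "Singapore" := by
  have hmap : ((pvCandidates regs).find? (fun p => p.1.1 == 0)).map (·.2)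
      = regs.find? (fun r => decide (r ∈ regionKeys) && r != "Singapore") :=
    candidates_find regs 0
  cases hf : (pvCandidates regs).find? (fun p => p.1.1 == 0) with
  | some c0 =>
    have hne : pvCandidates regs ≠ [] := by
      intro h; rw [h] at hf; simp [List.find?] at hf
    cases hcs : pvCandidates regs with
    | nil => exact absurd hcs hne
    | cons c cs =>
      have hmin : pvMinBy c cs = c0 := by
        apply pvMinBy_first_zero cs c
        · rw [← hcs]; exact candidates_pairwise regs
        · intro p hp; exact (candidates_flag regs p (hcs ▸ hp)).1
        · rw [← hcs]; exact hf
      show (pvMinBy c cs).2 = _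
      rw [hmin]
      rw [hf] at hmap
      simp at hmap
      simp [← hmap]
  | none =>
    rw [hf] at hmap
    simp at hmap
    rw [← hmap]
    simp only [Option.getD_none]
    cases hcs : pvCandidates regs with
    | nil => rfl
    | cons c cs =>
      show (pvMinBy c cs).2 = _
      have hmem : pvMinBy c cs ∈ c :: cs := mem_pvMinBy cs c
      have hflag : ¬ ((pvMinBy c cs).1.1 == 0) := by
        have := List.find?_eq_none.mp hf (pvMinBy c cs) (hcs ▸ hmem)
        simpa using this
      have := (candidates_flag regs (pvMinBy c cs) (hcs ▸ hmem)).2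
      exact this (by simpa using hflag)

-- ===== VERDICT (by name: the statement is the Claim_ definition above) =====
theorem select_region_py_spec : Claim_equal_select_region_py := by
  intro src regs _
  unfold Spec_select_region_py select_region_py select_region_py_alt
  by_cases hsrc : src ∈ regionKeys
  · simp [hsrc]
  · simp only [List.contains_eq_mem, hsrc, decide_false, Bool.false_eq_true, if_false]
    rw [alt_eq_find]
    rw [find?_eq_pvLoopA1]
    cases h1 : pvLoopA1 regs with
    | some r => simp
    | none => simpa using loopA2_singapore regs h1
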